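-- pv_equiv track=rewrite | github.com/kkr010128/codebert | problem292/problem292_30.py | actual
-- ===== SOURCE A (Python) =====
-- import itertools
--
-- def actual(n, D):
--     """
--     combinations でゴリ押し
--     """
--     comb = itertools.combinations(D, 2)
--
--     # return sum([x * y for x, y in comb])
--
--     """
--     「順番を考慮しない2要素の選び方」を全探索する際のポイント
--         内側のループ変数の始点を外側のループ変数 +1 から始めるとよい。
--         これにより、内側のループで選ぶインデックスが必ず外側のループで選ぶインデックスより大きくなり、
--         同じ選び方を 2 回見てしまうことを回避できます。
--     """
--     # s = 0
--     # for i in range(len(D)):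
--     #     for j in range(i + 1, len(D)):
--     #         s += D[i] * D[j]
--     #
--     # return s
--
--     """
--     O(N)で解くパターン
--
--     ex: a, b, c, d
--         a*b + a*c + a*d = a * (b + c +d)
--               b*c + b*d = b * (    c +d)
--                     c*d = c * (       d)
--     """
--     s = 0
--     for i in range(len(D) - 1):
--         s += D[i] * sum(D[i + 1:])
--
--     return s
-- ===== SOURCE B (Python) =====
-- def actual(n, D):
--     s = sum(D)
--     q = sum(x * x for x in D)
--     return (s * s - q) // 2
-- ===== Notes on version B (the rewrite author's own statement) =====
-- stated objective: faster
-- what changed: Replaced the loop that multiplies each element by the sum of a freshly materialised suffix slice with the closed form (sum(D)^2 - sum of squares) // 2 computed in two linear passes.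
import Mathlib
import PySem

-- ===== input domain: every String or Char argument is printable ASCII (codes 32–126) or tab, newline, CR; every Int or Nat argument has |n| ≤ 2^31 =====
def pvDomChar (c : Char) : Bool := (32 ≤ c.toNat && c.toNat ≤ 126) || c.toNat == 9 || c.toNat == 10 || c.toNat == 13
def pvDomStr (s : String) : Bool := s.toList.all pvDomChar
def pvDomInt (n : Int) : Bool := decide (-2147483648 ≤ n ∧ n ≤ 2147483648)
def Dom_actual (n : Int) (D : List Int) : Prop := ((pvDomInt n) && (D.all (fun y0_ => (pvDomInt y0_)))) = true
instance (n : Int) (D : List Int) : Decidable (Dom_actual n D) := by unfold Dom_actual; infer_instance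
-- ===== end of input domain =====

-- B replaces A's quadratic suffix-slice loop with the closed form (sum^2 - sum of squares) // 2: faster (O(n) vs O(n^2)).


-- ===== PORT A =====
-- s = 0; for i in range(len(D) - 1): s += D[i] * sum(D[i+1:]); return s
def actual (n : Int) (D : List Int) : Int :=
  (PySem.List.pyRange 0 ((D.length : Int) - 1) 1).foldl
    (fun s i => s + PySem.List.pyGetD D i 0 * (PySem.List.slice D (some (i + 1)) none).sum) 0

-- ===== PORT B =====
-- s = sum(D); q = sum(x*x for x in D); return (s*s - q) // 2
def actual_alt (n : Int) (D : List Int) : Int :=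
  let s := D.sum
  let q := (D.map (fun x => x * x)).sum
  PySem.Int.floordiv (s * s - q) 2

-- ===== PRECONDITION & SPEC =====
def Spec_actual (n : Int) (D : List Int) (out : Int) : Prop := out = actual_alt n D
instance (n : Int) (D : List Int) (out : Int) : Decidable (Spec_actual n D out) := by unfold Spec_actual; infer_instance

-- ===== CLAIM (what is proved, stated in full; the proofs are below) =====
def Claim_equal_actual : Prop := ∀ (n : Int) (D : List Int), Dom_actual n D → Spec_actual n D (actual n D)

-- ===== LEMMAS AND PROOFS =====

-- the pair-product sum, structurally: Σ_{i<j} D[i]*D[j]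
def pairSum : List Int → Int
  | [] => 0
  | a :: t => a * t.sum + pairSum t

-- A's loop computes pairSum D
lemma rangeSum_eq_pairSum (D : List Int) :
    ((List.range (D.length - 1)).map
      (fun k => D.getD k 0 * (D.drop (k + 1)).sum)).sum = pairSum D := by
  induction D with
  | nil => simp [pairSum]
  | cons a t ih =>
    cases t with
    | nil => simp [pairSum]
    | cons b u =>
      rw [show (a :: b :: u).length - 1 = ((b :: u).length - 1) + 1 by simp]
      rw [List.range_succ_eq_map]
      simpa [pairSum, Function.comp] using ih

lemma actual_eq_pairSum (n : Int) (D : List Int) : actual n D = pairSum D := by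
  unfold actual
  rw [PySem.List.foldl_add, PySem.List.pyRange_one]
  rw [← rangeSum_eq_pairSum D, List.map_map]
  rw [show (((D.length : Int) - 1) - 0).toNat = D.length - 1 by omega]
  rw [zero_add]
  apply congrArg List.sum
  apply List.map_congr_left
  intro k _
  simp only [Function.comp, zero_add]
  rw [PySem.List.pyGetD_natCast]
  rw [show ((k : Int) + 1) = (((k + 1 : Nat) : Int)) by push_cast; ring]
  rw [PySem.List.slice_from_natCast]

-- twice the pair sum is sum² minus the sum of squares
lemma two_mul_pairSum (D : List Int) :
    pairSum D * 2 = D.sum * D.sum - (D.map (fun x => x * x)).sum := by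
  induction D with
  | nil => simp [pairSum]
  | cons a t ih => simp [pairSum]; ring_nf; ring_nf at ih; omega

lemma actual_alt_eq_pairSum (n : Int) (D : List Int) : actual_alt n D = pairSum D := by
  unfold actual_alt
  simp only
  rw [← two_mul_pairSum]
  rw [PySem.Int.floordiv_eq_ediv_of_pos (by omega)]
  exact Int.mul_ediv_cancel _ (by omega)

-- ===== VERDICT (by name: the statement is the Claim_ definition above) =====
theorem actual_spec : Claim_equal_actual := by
  intro n D _
  unfold Spec_actual
  rw [actual_eq_pairSum, actual_alt_eq_pairSum]
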